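-- pv_equiv track=rewrite | github.com/Dootsire/AoC-2024 | day9/diskOrganizer.py | find_remaining_space
-- ===== SOURCE A (Python) =====
-- def find_remaining_space(layout, id_index):
--     space = id_index[1] - id_index[0] + 1
--     space_found = 0
--     index = -1
--     for i in range(id_index[0]):
--         if index == -1 and layout[i] == '.':
--             index = i
--         if layout[i] == '.':
--             space_found += 1
--         else:
--             space_found = 0
--             index = -1
--         if space_found == space:
--             return index
--     return -1
-- ===== SOURCE B (Python) =====
-- def find_remaining_space(layout, id_index):
--     space = id_index[1] - id_index[0] + 1
--     lo = id_index[0]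
--     if space < 1:
--         return -1
--     for i in range(lo - space + 1):
--         if all(layout[j] == '.' for j in range(i, i + space)):
--             return i
--     return -1
-- ===== Notes on version B (the rewrite author's own statement) =====
-- stated objective: alternative
-- what changed: A's single-pass run-length state machine (consecutive-dot counter plus run-start index) is replaced by a direct first-fit window search: for each candidate start i in range(id_index[0] - space + 1), test whether the whole space-long window is dots and return the first i that fits.
-- outside the precondition, e.g. on find_remaining_space(['.'], (2, 2)): A returns 0, B returns 0
import Mathlib
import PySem

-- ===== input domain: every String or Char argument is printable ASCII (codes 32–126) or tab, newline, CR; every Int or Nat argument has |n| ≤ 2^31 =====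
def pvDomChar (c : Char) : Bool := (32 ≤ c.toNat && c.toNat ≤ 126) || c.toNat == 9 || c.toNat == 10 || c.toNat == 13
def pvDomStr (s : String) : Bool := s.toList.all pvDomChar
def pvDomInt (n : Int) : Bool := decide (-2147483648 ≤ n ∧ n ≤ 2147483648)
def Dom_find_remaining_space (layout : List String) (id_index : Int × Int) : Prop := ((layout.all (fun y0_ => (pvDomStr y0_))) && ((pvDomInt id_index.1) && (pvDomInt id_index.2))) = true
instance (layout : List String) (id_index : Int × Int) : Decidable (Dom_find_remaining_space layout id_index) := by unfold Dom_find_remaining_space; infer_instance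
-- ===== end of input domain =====

-- B replaces A's one-pass run-length state machine with a direct first-fit window search
-- (first i in range(lo - space + 1) whose space-long window is all '.'); objective: alternative.

-- ===== PORT A =====
-- state machine of A: sf = current consecutive-dot count, idx = start of current dot run (or -1)
def goA (layout : List String) (space : Int) (l : List Int) (sf idx : Int) : Int :=
  match l with
  | [] => -1
  | i :: rest =>
    let c := (PySem.List.pyGet? layout i).getD ""   -- layout[i]; in range on every input Pre_ admits
    let idx1 := if idx = -1 ∧ c = "." then i else idx
    let sf1 := if c = "." then sf + 1 else 0
    let idx2 := if c = "." then idx1 else -1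
    if sf1 = space then idx2 else goA layout space rest sf1 idx2

def find_remaining_space (layout : List String) (id_index : Int × Int) : Int :=
  goA layout (id_index.2 - id_index.1 + 1) (PySem.List.pyRange 0 id_index.1 1) 0 (-1)

-- ===== PORT B =====
-- all(layout[j] == '.' for j in range(a, b))
def winAll (layout : List String) (l : List Int) : Bool :=
  match l with
  | [] => true
  | j :: rest => ((PySem.List.pyGet? layout j).getD "" == ".") && winAll layout rest

def goB (layout : List String) (space : Int) (l : List Int) : Int :=
  match l with
  | [] => -1
  | i :: rest =>
    if winAll layout (PySem.List.pyRange i (i + space) 1) then i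
    else goB layout space rest

def find_remaining_space_alt (layout : List String) (id_index : Int × Int) : Int :=
  let space := id_index.2 - id_index.1 + 1
  let lo := id_index.1
  if space < 1 then -1
  else goB layout space (PySem.List.pyRange 0 (lo - space + 1) 1)

-- ===== PRECONDITION & SPEC =====
-- Pre_ excludes id_index[0] > len(layout), where Python A raises IndexError unless an early
-- fit is found first; on those early-return inputs A and B agree anyway (see cites).
def Pre_find_remaining_space (layout : List String) (id_index : Int × Int) : Prop :=
  id_index.1 ≤ (layout.length : Int)
instance (layout : List String) (id_index : Int × Int) : Decidable (Pre_find_remaining_space layout id_index) := by unfold Pre_find_remaining_space; infer_instance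

def pvWitness_find_remaining_space : List String × (Int × Int) := (["7", ".", ".", "x"], (3, 4))

def Spec_find_remaining_space (layout : List String) (id_index : Int × Int) (out : Int) : Prop := out = find_remaining_space_alt layout id_index
instance (layout : List String) (id_index : Int × Int) (out : Int) : Decidable (Spec_find_remaining_space layout id_index out) := by unfold Spec_find_remaining_space; infer_instance

-- ===== CLAIM (what is proved, stated in full; the proofs are below) =====
def Claim_equal_find_remaining_space : Prop := ∀ (layout : List String) (id_index : Int × Int), Dom_find_remaining_space layout id_index → Pre_find_remaining_space layout id_index → Spec_find_remaining_space layout id_index (find_remaining_space layout id_index)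

-- ===== LEMMAS AND PROOFS =====

-- abbreviation used only by the proofs
def dotAt (layout : List String) (j : Int) : Bool :=
  (PySem.List.pyGet? layout j).getD "" == "."

lemma winAll_eq_true (layout : List String) :
    ∀ (l : List Int), winAll layout l = true ↔ ∀ j ∈ l, dotAt layout j = true := by
  intro l
  induction l with
  | nil => simp [winAll]
  | cons j rest ih => simp [winAll, dotAt, ih]

-- when space ≤ 0, A returns -1 (the accidental `return index` at space == 0 also yields -1)
lemma goA_nonpos (layout : List String) (space : Int) (hsp : space ≤ 0) :
    ∀ (l : List Int) (sf idx : Int), 0 ≤ sf →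
      goA layout space l sf idx = -1 := by
  intro l
  induction l with
  | nil => intro sf idx _; simp [goA]
  | cons i rest ih =>
    intro sf idx hsf
    simp only [goA]
    by_cases hc : (PySem.List.pyGet? layout i).getD "" = "."
    · simp only [hc]
      have h1 : ¬ (sf + 1 = space) := by omega
      simp [h1, ih (sf + 1) _ (by omega)]
    · by_cases h0 : (0 : Int) = space
      · simp [hc, ← h0]
      · simp [hc, h0, ih 0 (-1) (by omega)]

-- skipping refuted candidates does not change goB's answer
lemma goB_skip (layout : List String) (space M : Int) :
    ∀ (n : Nat) (a b : Int), (b - a).toNat ≤ n → a ≤ b →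
      (∀ i, a ≤ i → i < b → winAll layout (PySem.List.pyRange i (i + space) 1) = false) →
      goB layout space (PySem.List.pyRange a M 1) = goB layout space (PySem.List.pyRange b M 1) := by
  intro n
  induction n with
  | zero =>
    intro a b hn hab _
    have : a = b := by omega
    simp [this]
  | succ n ih =>
    intro a b hn hab hfail
    by_cases heq : a = b
    · simp [heq]
    · have hlt : a < b := by omega
      by_cases haM : a < M
      · rw [PySem.List.pyRange_one_cons haM]
        simp only [goB, hfail a le_rfl hlt]
        exact ih (a + 1) b (by omega) (by omega) (fun i h1 h2 => hfail i (by omega) h2)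
      · -- a ≥ M : both ranges are empty
        rw [PySem.List.pyRange_one_eq_nil (by omega), PySem.List.pyRange_one_eq_nil (by omega)]

-- main alignment: A's state machine at position k, with a trailing dot run of length sf,
-- computes the same answer as B's window scan starting at candidate k - sf
lemma mainA (layout : List String) (space lo : Int) (hsp : 1 ≤ space) :
    ∀ (n : Nat) (k sf : Int), (lo - k).toNat ≤ n →
      0 ≤ sf → sf ≤ k → sf < space →
      (∀ j, k - sf ≤ j → j < k → dotAt layout j = true) →
      goA layout space (PySem.List.pyRange k lo 1) sf (if sf = 0 then -1 else k - sf) =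
      goB layout space (PySem.List.pyRange (k - sf) (lo - space + 1) 1) := by
  intro n
  induction n with
  | zero =>
    intro k sf hn hsf0 hsfk hsfsp _
    have hk : lo ≤ k := by omega
    rw [PySem.List.pyRange_one_eq_nil hk, PySem.List.pyRange_one_eq_nil (by omega)]
    simp [goA, goB]
  | succ n ih =>
    intro k sf hn hsf0 hsfk hsfsp hrun
    by_cases hk : lo ≤ k
    · rw [PySem.List.pyRange_one_eq_nil hk, PySem.List.pyRange_one_eq_nil (by omega)]
      simp [goA, goB]
    · have hklo : k < lo := by omega
      rw [PySem.List.pyRange_one_cons hklo]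
      simp only [goA]
      by_cases hc : (PySem.List.pyGet? layout k).getD "" = "."
      · -- layout[k] is a dot
        by_cases hret : sf + 1 = space
        · -- A returns the start of the run; B's first candidate k - sf fits
          have hcand : k - sf < lo - space + 1 := by omega
          rw [PySem.List.pyRange_one_cons hcand]
          simp only [goB]
          have hwin : winAll layout (PySem.List.pyRange (k - sf) (k - sf + space) 1) = true := by
            rw [winAll_eq_true]
            intro j hj
            rw [PySem.List.mem_pyRange_one] at hj
            by_cases hjk : j < k
            · exact hrun j hj.1 hjk
            · have : j = k := by omega
              simp [this, dotAt, hc]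
          rw [hwin]
          by_cases h0 : sf = 0
          · have hr1 : ((1:Int) = space) := by omega
            simp [hc, h0, ← hr1]
          · have hne : ¬ (k - sf = -1) := by omega
            simp [hc, hret, h0, hne]
        · -- run continues
          have hIH := ih (k + 1) (sf + 1) (by omega) (by omega) (by omega) (by omega)
            (by intro j h1 h2
                by_cases hjk : j < k
                · exact hrun j (by omega) hjk
                · have : j = k := by omega
                  simp [this, dotAt, hc])
          have hsne : ¬ (sf + 1 = 0) := by omega
          have harg2 : k + 1 - (sf + 1) = k - sf := by ring
          rw [if_neg hsne, harg2] at hIH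
          by_cases h0 : sf = 0
          · have e : k - (0:Int) = k := by ring
            rw [h0, e] at hIH
            have hr1 : ¬ ((1:Int) = space) := by omega
            simp [hc, hr1, h0]
            simpa using hIH
          · have hne : ¬ (k - sf = -1) := by omega
            simp [hc, hret, h0, hne]
            exact hIH
      · -- layout[k] is not a dot: run resets, candidates in [k - sf, k] are all refuted
        have hret : ¬ ((0:Int) = space) := by omega
        have hstep := ih (k + 1) 0 (by omega) le_rfl (by omega) (by omega)
          (by intro j h1 h2; omega)
        have e : k + 1 - (0:Int) = k + 1 := by ring
        rw [if_pos rfl, e] at hstep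
        have hskip := goB_skip layout space (lo - space + 1) (sf + 1).toNat (k - sf) (k + 1)
          (by omega) (by omega)
          (by intro i h1 h2
              cases hwb : winAll layout (PySem.List.pyRange i (i + space) 1) with
              | false => rfl
              | true =>
                exfalso
                rw [winAll_eq_true] at hwb
                have hkmem : (k : Int) ∈ PySem.List.pyRange i (i + space) 1 := by
                  rw [PySem.List.mem_pyRange_one]; omega
                have := hwb k hkmem
                simp [dotAt, hc] at this)
        simp [hc, hret]
        rw [hstep, hskip]

-- ===== VERDICT (by name: the statement is the Claim_ definition above) =====
theorem find_remaining_space_spec : Claim_equal_find_remaining_space := by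
  intro layout id_index _ _
  unfold Spec_find_remaining_space find_remaining_space find_remaining_space_alt
  set space := id_index.2 - id_index.1 + 1 with hspace
  by_cases hsp : space < 1
  · simp only [if_pos hsp]
    exact goA_nonpos layout space (by omega) _ 0 (-1) le_rfl
  · simp only [if_neg hsp]
    have h := mainA layout space id_index.1 (by omega) (id_index.1).toNat 0 0
      (by omega) le_rfl le_rfl (by omega) (by intro j h1 h2; omega)
    simpa using h
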